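-- pv_equiv track=rewrite | github.com/ALON1310/fing-a-job | salary_parser.py | _is_valid_number_token
-- ===== SOURCE A (Python) =====
-- def _is_valid_number_token(token: str) -> bool:
--     """
--     Validate a numeric token after normalization.
--
--     We allow:
--       - digits
--       - commas (thousands separators)
--       - at most one dot
--
--     Reject tokens like:
--       - "." or ","
--       - "1..2"
--       - "1,2,3.4.5"
--     """
--     if not token:
--         return False
--
--     # Must contain at least one digit
--     if not any(ch.isdigit() for ch in token):
--         return False
--
--     # At most one dot
--     if token.count(".") > 1:
--         return False
--
--     # Token should not be only punctuation
--     stripped = token.replace(",", "").replace(".", "")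
--     return stripped.isdigit()
-- ===== SOURCE B (Python) =====
-- def _is_valid_number_token(token: str) -> bool:
--     dots = 0
--     has_digit = False
--     for ch in token:
--         if ch == ',':
--             continue
--         if ch == '.':
--             dots += 1
--         elif ch.isdigit():
--             has_digit = True
--         else:
--             return False
--     return has_digit and dots <= 1
-- ===== Notes on version B (the rewrite author's own statement) =====
-- stated objective: simpler
-- what changed: Replaced A's four separate passes (emptiness, any-digit, dot count, replace-then-isdigit) by one single early-exit loop maintaining a dot counter and a has-digit flag.
import Mathlib
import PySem

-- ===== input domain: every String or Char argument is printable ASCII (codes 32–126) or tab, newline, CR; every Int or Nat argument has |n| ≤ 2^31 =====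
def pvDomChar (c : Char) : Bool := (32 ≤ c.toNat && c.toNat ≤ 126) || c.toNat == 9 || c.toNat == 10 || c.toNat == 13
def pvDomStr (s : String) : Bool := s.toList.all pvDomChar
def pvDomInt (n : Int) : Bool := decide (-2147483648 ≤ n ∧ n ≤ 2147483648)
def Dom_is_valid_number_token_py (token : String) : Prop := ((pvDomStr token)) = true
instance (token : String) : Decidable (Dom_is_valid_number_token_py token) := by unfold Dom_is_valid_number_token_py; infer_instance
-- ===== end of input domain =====

-- B collapses A's four separate passes over the token (emptiness, any-digit, dot count, replace-then-isdigit) into one early-exit loop; objective: simpler.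


-- ===== PORT A =====
def is_valid_number_token_py (token : String) : Bool :=
  -- if not token: return False
  if token.toList.isEmpty then false
  -- if not any(ch.isdigit() for ch in token): return False
  else if !(token.toList.any PySem.Chars.isdigit) then false
  -- if token.count(".") > 1: return False
  else if PySem.Str.count token "." > 1 then false
  -- stripped = token.replace(",", "").replace(".", ""); return stripped.isdigit()
  else PySem.Str.strIsdigit (PySem.Str.replace (PySem.Str.replace token "," "") "." "")

-- ===== PORT B =====
-- the single loop of Source B: dot counter + has_digit flag, early False on any other char
def pvAltLoop : List Char → Nat → Bool → Bool
  | [], dots, has_digit => has_digit && dots ≤ 1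
  | ch :: rest, dots, has_digit =>
    if ch = ',' then pvAltLoop rest dots has_digit
    else if ch = '.' then pvAltLoop rest (dots + 1) has_digit
    else if PySem.Chars.isdigit ch then pvAltLoop rest dots true
    else false

def is_valid_number_token_py_alt (token : String) : Bool :=
  pvAltLoop token.toList 0 false

-- ===== PRECONDITION & SPEC =====
def Spec_is_valid_number_token_py (token : String) (out : Bool) : Prop := out = is_valid_number_token_py_alt token
instance (token : String) (out : Bool) : Decidable (Spec_is_valid_number_token_py token out) := by unfold Spec_is_valid_number_token_py; infer_instance

-- ===== CLAIM (what is proved, stated in full; the proofs are below) =====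
def Claim_equal_is_valid_number_token_py : Prop := ∀ (token : String), Dom_is_valid_number_token_py token → Spec_is_valid_number_token_py token (is_valid_number_token_py token)

-- ===== LEMMAS AND PROOFS =====

-- a char is acceptable to B's loop iff it is a comma, a dot or a digit
def pvOk (c : Char) : Bool := c = ',' || c = '.' || PySem.Chars.isdigit c

-- closed form of B's loop
theorem pvAltLoop_eq (cs : List Char) : ∀ (dots : Nat) (hd : Bool),
    pvAltLoop cs dots hd =
      (cs.all pvOk && (hd || cs.any PySem.Chars.isdigit) && decide (dots + cs.count '.' ≤ 1)) := by
  induction cs with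
  | nil => intro dots hd; simp [pvAltLoop]
  | cons c t ih =>
    intro dots hd
    simp only [pvAltLoop]
    by_cases hc : c = ','
    · subst hc
      simp [ih, pvOk, PySem.Chars.isdigit]
    · by_cases hd' : c = '.'
      · subst hd'
        have : ∀ x : Nat, (dots + 1 + x ≤ 1) = (dots + (x + 1) ≤ 1) := by
          intro x; rw [eq_iff_iff]; omega
        simp [ih, pvOk, PySem.Chars.isdigit, this]
      · by_cases hdig : PySem.Chars.isdigit c
        · simp [hc, hd', hdig, ih, pvOk, List.count_cons]
        · simp [hc, hd', hdig, pvOk]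

-- counting a single-character substring is counting the character
theorem count_go_singleton (c : Char) : ∀ (s : List Char) (fuel acc : Nat), s.length ≤ fuel →
    PySem.Chars.count.go [c] fuel s acc = acc + s.count c := by
  intro s
  induction s with
  | nil => intro fuel acc _; cases fuel <;> simp [PySem.Chars.count.go]
  | cons h t ih =>
    intro fuel acc hf
    cases fuel with
    | zero => simp at hf
    | succ n =>
      by_cases hhc : h = c
      · subst hhc
        simp only [PySem.Chars.count.go, List.isPrefixOf]
        simp [ih n (acc + 1) (by simpa using hf)]
        omega
      · have hpre : ¬ ([c].isPrefixOf (h :: t) = true) := by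
          simp [List.isPrefixOf]; exact fun h' => hhc h'.symm
        simp only [PySem.Chars.count.go, hpre]
        simp [ih n acc (by simpa using hf), List.count_cons, hhc]

theorem count_singleton (s : List Char) (c : Char) : PySem.Chars.count s [c] = s.count c := by
  simp [PySem.Chars.count, count_go_singleton c s s.length 0 le_rfl]

-- replacing a single character by the empty string is filtering it out
theorem replace_go_singleton (c : Char) : ∀ (s : List Char) (fuel : Nat) (acc : List Char), s.length ≤ fuel →
    PySem.Chars.replace.go [c] [] fuel s acc = acc.reverse ++ s.filter (· ≠ c) := by
  intro s
  induction s with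
  | nil => intro fuel acc _; cases fuel <;> simp [PySem.Chars.replace.go]
  | cons h t ih =>
    intro fuel acc hf
    cases fuel with
    | zero => simp at hf
    | succ n =>
      by_cases hhc : h = c
      · subst hhc
        simp only [PySem.Chars.replace.go, List.isPrefixOf]
        simp [ih n acc (by simpa using hf)]
      · have hpre : ¬ ([c].isPrefixOf (h :: t) = true) := by
          simp [List.isPrefixOf]; exact fun h' => hhc h'.symm
        simp only [PySem.Chars.replace.go, hpre]
        rw [ih n (h :: acc) (by simpa using hf)]
        simp [hhc]

theorem replace_singleton (s : List Char) (c : Char) :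
    PySem.Chars.replace s [c] [] = s.filter (· ≠ c) := by
  simp [PySem.Chars.replace, replace_go_singleton c s s.length [] le_rfl]

-- a digit is neither a comma nor a dot
theorem digit_ne (c : Char) (h : PySem.Chars.isdigit c = true) : c ≠ ',' ∧ c ≠ '.' := by
  simp [PySem.Chars.isdigit] at h
  constructor <;> rintro rfl <;> simp_all

theorem pv_main (token : String) :
    is_valid_number_token_py token = is_valid_number_token_py_alt token := by
  unfold is_valid_number_token_py is_valid_number_token_py_alt
  rw [pvAltLoop_eq]
  have hcount : PySem.Str.count token "." = token.toList.count '.' := by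
    show PySem.Chars.count token.toList (".").toList = _
    rw [show (".").toList = ['.'] from rfl, count_singleton]
  have hrep : (PySem.Str.replace (PySem.Str.replace token "," "") "." "").toList
      = (token.toList.filter (· ≠ ',')).filter (· ≠ '.') := by
    rw [PySem.Str.toList_replace, PySem.Str.toList_replace,
        show (",").toList = [','] from rfl, show (".").toList = ['.'] from rfl,
        show ("").toList = ([] : List Char) from rfl,
        replace_singleton, replace_singleton]
  by_cases hany : token.toList.any PySem.Chars.isdigit
  · have hne : token.toList.isEmpty = false := by
      rcases h : token.toList with _ | ⟨a, b⟩ <;> simp_all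
    rw [hne, if_neg (by simp), hany]
    simp only [Bool.not_true, Bool.false_eq_true, if_false, Bool.or_true, Bool.and_true]
    by_cases hcnt : PySem.Str.count token "." > 1
    · rw [if_pos hcnt]
      have : ¬ ((0 : Nat) + token.toList.count '.' ≤ 1) := by rw [hcount] at hcnt; omega
      simp only [this, decide_false, Bool.and_false]
    · rw [if_neg hcnt]
      have hle : ((0 : Nat) + token.toList.count '.' ≤ 1) := by rw [hcount] at hcnt; omega
      rw [decide_eq_true hle, Bool.and_true]
      obtain ⟨d, hdmem, hdd⟩ := List.any_eq_true.mp hany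
      have hdne := digit_ne d hdd
      have hnonempty : ((token.toList.filter (· ≠ ',')).filter (· ≠ '.')).isEmpty = false := by
        have : d ∈ (token.toList.filter (· ≠ ',')).filter (· ≠ '.') := by
          simp [List.mem_filter, hdmem, hdne.1, hdne.2]
        have hne' := List.ne_nil_of_mem this
        rcases h : (token.toList.filter (· ≠ ',')).filter (· ≠ '.') with _ | _
        · exact absurd h hne'
        · simp
      rw [PySem.Str.strIsdigit, PySem.Chars.strIsdigit, hrep, hnonempty]
      simp only [Bool.not_false, Bool.true_and]
      rw [Bool.eq_iff_iff]
      simp only [List.all_filter, List.all_eq_true]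
      constructor
      · intro h x hx
        have := h x hx
        by_cases h1 : x = ',' <;> by_cases h2 : x = '.' <;>
          simp_all [pvOk]
      · intro h x hx
        have := h x hx
        by_cases h1 : x = ',' <;> by_cases h2 : x = '.' <;>
          simp_all [pvOk]
  · rw [Bool.not_eq_true] at hany
    rw [hany]
    simp only [Bool.not_false, if_true, Bool.or_false]
    cases h : token.toList.isEmpty
    · rw [if_neg (by simp [h])]
      simp [hany]
    · simp

-- ===== VERDICT (by name: the statement is the Claim_ definition above) =====
theorem is_valid_number_token_py_spec : Claim_equal_is_valid_number_token_py := by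
  intro token _
  exact pv_main token
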